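-- pv_equiv track=rewrite | github.com/Siegel-Lab/Rabuffo_et_al_Tb427v12_assembly_pipeline | scripts/get_read_pos_and_strand.py | get_clipped_bases
-- ===== SOURCE A (Python) =====
-- def get_clipped_bases(cigar):
--     first_symbol_idx = 0
--     while first_symbol_idx < len(cigar) and cigar[first_symbol_idx].isdigit():
--         first_symbol_idx += 1
--     if first_symbol_idx == len(cigar):
--         return 0
--     if not cigar[first_symbol_idx] in ["S", "H"]:
--         return 0
--     return int(cigar[:first_symbol_idx])
-- ===== SOURCE B (Python) =====
-- import re
--
-- _CLIP_RE = re.compile(r'(\d*)([SH])')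
--
-- def get_clipped_bases(cigar):
--     m = _CLIP_RE.match(cigar)
--     return int(m.group(1)) if m else 0
-- ===== Notes on version B (the rewrite author's own statement) =====
-- stated objective: idiomatic
-- what changed: Replaces the manual index-advancing while-loop and branch chain with a single anchored regex match '(\d*)([SH])': no match means 0, otherwise the captured digit group is converted.
import Mathlib
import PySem

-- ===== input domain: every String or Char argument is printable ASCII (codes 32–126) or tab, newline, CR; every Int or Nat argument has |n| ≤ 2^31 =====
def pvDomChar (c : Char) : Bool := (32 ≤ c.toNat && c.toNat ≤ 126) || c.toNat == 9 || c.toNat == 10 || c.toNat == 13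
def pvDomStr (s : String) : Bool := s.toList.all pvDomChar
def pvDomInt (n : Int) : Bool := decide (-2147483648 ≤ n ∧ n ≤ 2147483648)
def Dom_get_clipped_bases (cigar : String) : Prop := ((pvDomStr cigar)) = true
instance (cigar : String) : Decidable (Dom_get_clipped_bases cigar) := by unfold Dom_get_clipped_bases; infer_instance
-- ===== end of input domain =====

-- B replaces A's manual index-advancing scan and branch chain with a single anchored
-- regex match (\d*)([SH]) (idiomatic); return values are proved equal wherever A returns.

-- ===== PORT A =====
-- the while-loop advancing first_symbol_idx while cigar[first_symbol_idx].isdigit()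
def pvAScan (cs : List Char) (i : Nat) : Nat :=
  if h : i < cs.length then
    if PySem.Chars.isdigit cs[i] then pvAScan cs (i + 1) else i
  else i
termination_by cs.length - i

def get_clipped_bases (cigar : String) : Int :=
  let cs := cigar.toList
  let firstSymbolIdx := pvAScan cs 0
  if firstSymbolIdx = cs.length then 0
  else if ¬ (cs.getD firstSymbolIdx ' ' = 'S' ∨ cs.getD firstSymbolIdx ' ' = 'H') then 0
  else (PySem.Int.ofChars? (cs.take firstSymbolIdx)).getD 0   -- int('') raises: excluded by Pre_

-- ===== PORT B =====
-- re.match(r'(\d*)([SH])', cigar): greedy \d* takes the maximal digit prefix; the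
-- next character must be S or H, else no match (digits are not S/H, so no backtrack succeeds).
def get_clipped_bases_alt (cigar : String) : Int :=
  let cs := cigar.toList
  let ds := cs.takeWhile PySem.Chars.isdigit
  match cs.drop ds.length with
  | c :: _ =>
    if c = 'S' ∨ c = 'H' then (PySem.Int.ofChars? ds).getD 0   -- int('') raises: excluded by Pre_
    else 0
  | [] => 0

-- ===== PRECONDITION & SPEC =====
-- Pre_ excludes exactly the strings whose first character is 'S' or 'H': there the leading
-- digit run is empty and BOTH programs raise ValueError on int('').
def Pre_get_clipped_bases (cigar : String) : Prop :=
  cigar.toList.head? ≠ some 'S' ∧ cigar.toList.head? ≠ some 'H'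
instance (cigar : String) : Decidable (Pre_get_clipped_bases cigar) := by
  unfold Pre_get_clipped_bases; infer_instance
def pvWitness_get_clipped_bases : String := "10S5M"

def Spec_get_clipped_bases (cigar : String) (out : Int) : Prop := out = get_clipped_bases_alt cigar
instance (cigar : String) (out : Int) : Decidable (Spec_get_clipped_bases cigar out) := by unfold Spec_get_clipped_bases; infer_instance

-- ===== CLAIM (what is proved, stated in full; the proofs are below) =====
def Claim_equal_get_clipped_bases : Prop := ∀ (cigar : String), Dom_get_clipped_bases cigar → Pre_get_clipped_bases cigar → Spec_get_clipped_bases cigar (get_clipped_bases cigar)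

-- ===== LEMMAS AND PROOFS =====

-- A's while-loop started at i computes i plus the digit run of the remaining suffix.
theorem pvAScan_eq (cs : List Char) (i : Nat) :
    pvAScan cs i = i + ((cs.drop i).takeWhile PySem.Chars.isdigit).length := by
  fun_induction pvAScan cs i with
  | case1 i h hd ih =>
    rw [ih, List.drop_eq_getElem_cons h, List.takeWhile_cons, if_pos hd]
    simp; omega
  | case2 i h hd =>
    rw [List.drop_eq_getElem_cons h, List.takeWhile_cons, if_neg hd]
    simp
  | case3 i h =>
    rw [List.drop_eq_nil_of_le (by omega)]
    simp

theorem pvAScan_zero (cs : List Char) :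
    pvAScan cs 0 = (cs.takeWhile PySem.Chars.isdigit).length := by
  simpa using pvAScan_eq cs 0

-- ===== VERDICT (by name: the statement is the Claim_ definition above) =====
theorem get_clipped_bases_spec : Claim_equal_get_clipped_bases := by
  intro cigar _ hpre
  unfold Spec_get_clipped_bases get_clipped_bases get_clipped_bases_alt
  set cs := cigar.toList with hcs
  set ds := cs.takeWhile PySem.Chars.isdigit with hds
  have hidx : pvAScan cs 0 = ds.length := pvAScan_zero cs
  have hdle : ds.length ≤ cs.length := (List.takeWhile_prefix _).length_le
  simp only [hidx]
  rcases hdrop : cs.drop ds.length with _ | ⟨c, rest⟩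
  · -- digit run is the whole string: A takes the first branch, B the [] branch
    have : cs.length ≤ ds.length := by
      simpa using List.drop_eq_nil_iff.mp hdrop
    rw [if_pos (by omega)]
  · -- a first non-digit symbol c exists
    have hlen : ds.length < cs.length := by
      by_contra h
      rw [List.drop_eq_nil_of_le (by omega)] at hdrop
      exact (List.cons_ne_nil _ _ hdrop.symm).elim
    have hget : cs.getD ds.length ' ' = c := by
      have h0 : (cs.drop ds.length)[0]? = some c := by rw [hdrop]; rfl
      rw [List.getElem?_drop] at h0
      simp only [Nat.add_zero] at h0
      simp [List.getD, h0]
    rw [if_neg (by omega), hget]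
    by_cases hc : c = 'S' ∨ c = 'H'
    · -- the clip branch: A slices cs[:idx] = ds, same int() as B
      have htake : cs.take ds.length = ds :=
        ((List.prefix_iff_eq_take).mp (List.takeWhile_prefix _)).symm
      rw [if_neg (not_not_intro hc)]
      dsimp only
      rw [if_pos hc, htake]
    · rw [if_pos hc]
      dsimp only
      rw [if_neg hc]
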